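-- pv_equiv track=rewrite | github.com/eugene87222/NCTU-Introduction-to-Artificial-Intelligence | HW3.py | subsumption
-- ===== SOURCE A (Python) =====
-- def subsumption(KB, clause):
--     insert = True
--     update = False
--     for i in range(len(KB)):
--         sentence = KB[i]
--         if not len(sentence):
--             continue
--         match = 0
--         for literal in clause:
--             if literal in sentence:
--                 match += 1
--         if match==len(sentence) and len(sentence)<=len(clause):
--             insert = False
--         elif match==len(clause) and len(sentence)>len(clause):
--             KB[i] = []
--             update = True
--     if insert:
--         KB.append(clause)
--         update = True
--     return update
-- ===== SOURCE B (Python) =====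
-- def subsumption(KB, clause):
--     # Inverted-index algorithm: build literal -> set of sentence indices once,
--     # then scatter-count per-sentence matches in one pass over the clause;
--     # A's inner 'literal in sentence' scans disappear. Mutates KB like A.
--     occ = {}
--     for i, s in enumerate(KB):
--         for lit in s:
--             occ.setdefault(lit, set()).add(i)
--     match = [0] * len(KB)
--     for lit in clause:
--         for i in occ.get(lit, ()):
--             match[i] += 1
--     n = len(clause)
--     insert = not any(s and m == len(s) and len(s) <= n
--                      for s, m in zip(KB, match))
--     update = insert
--     for i, s in enumerate(KB):
--         if s and len(s) > n and match[i] == n: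
--             KB[i] = []
--             update = True
--     if insert:
--         KB.append(clause)
--     return update
-- ===== Notes on version B (the rewrite author's own statement) =====
-- stated objective: faster
-- what changed: Replaces A's nested per-sentence membership scans with an inverted index (literal -> set of sentence indices) built once; match counts are then scatter-accumulated in a single pass over the clause and the insert/empty decisions read the precomputed counts; KB is mutated in place the same way.
import Mathlib
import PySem

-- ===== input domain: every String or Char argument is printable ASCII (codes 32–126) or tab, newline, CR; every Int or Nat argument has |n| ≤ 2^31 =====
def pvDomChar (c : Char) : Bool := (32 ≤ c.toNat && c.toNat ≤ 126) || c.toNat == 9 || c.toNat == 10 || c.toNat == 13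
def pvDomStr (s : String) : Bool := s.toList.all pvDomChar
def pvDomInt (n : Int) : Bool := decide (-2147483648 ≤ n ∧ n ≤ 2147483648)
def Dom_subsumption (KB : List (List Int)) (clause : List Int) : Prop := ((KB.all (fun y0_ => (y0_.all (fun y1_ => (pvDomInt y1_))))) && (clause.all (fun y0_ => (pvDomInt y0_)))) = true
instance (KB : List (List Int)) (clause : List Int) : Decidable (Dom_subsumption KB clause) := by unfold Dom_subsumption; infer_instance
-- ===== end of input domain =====

-- B replaces A's nested membership scans by an inverted index (literal -> set of sentence
-- indices) and scatter-counted matches; equivalence is about the RETURN value only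
-- (both Pythons mutate KB in place the same way).

-- ===== PORT A =====
-- A's in-place write KB[i] = [] happens only at the already-visited index, so it never
-- affects a later read of the loop; the fold carries the (insert, update) flags.
def subsumption (KB : List (List Int)) (clause : List Int) : Bool :=
  let st := KB.foldl (fun (st : Bool × Bool) sentence =>
    if sentence.length = 0 then st
    else
      let m := clause.foldl (fun m lit => if lit ∈ sentence then m + 1 else m) 0
      if m = sentence.length ∧ sentence.length ≤ clause.length then (false, st.2)
      else if m = clause.length ∧ sentence.length > clause.length then (st.1, true)
      else st) (true, false)
  if st.1 then true else st.2

-- ===== PORT B =====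
-- occ.setdefault(lit, set()).add(i)  =  d.modify lit [] (fun t => Set.add t i);
-- match[i] += 1 is pySetD/pyGetD (indices from enumerate are always in range).
def subsumption_alt (KB : List (List Int)) (clause : List Int) : Bool :=
  let occ : PySem.Dict Int (PySem.Set Int) :=
    (PySem.List.enumerate KB).foldl (fun d p =>
      p.2.foldl (fun d lit => d.modify lit [] (fun t => PySem.Set.add t p.1)) d)
      PySem.Dict.empty
  let matchs : List Nat :=
    clause.foldl (fun m lit =>
      (occ.getD lit []).foldl (fun m i =>
        PySem.List.pySetD m i (PySem.List.pyGetD m i 0 + 1)) m)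
      (List.replicate KB.length 0)
  let n := clause.length
  let insert := ! (KB.zip matchs).any (fun p =>
    !p.1.isEmpty && (p.2 == p.1.length) && decide (p.1.length ≤ n))
  let update := (PySem.List.enumerate KB).foldl (fun u p =>
    if !p.2.isEmpty && decide (n < p.2.length) && (PySem.List.pyGetD matchs p.1 0 == n)
    then true else u) insert
  update

-- ===== PRECONDITION & SPEC =====
def Spec_subsumption (KB : List (List Int)) (clause : List Int) (out : Bool) : Prop := out = subsumption_alt KB clause
instance (KB : List (List Int)) (clause : List Int) (out : Bool) : Decidable (Spec_subsumption KB clause out) := by unfold Spec_subsumption; infer_instance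

-- ===== CLAIM (what is proved, stated in full; the proofs are below) =====
def Claim_equal_subsumption : Prop := ∀ (KB : List (List Int)) (clause : List Int), Dom_subsumption KB clause → Spec_subsumption KB clause (subsumption KB clause)

-- ===== LEMMAS AND PROOFS =====

-- A's hand-written counting loop equals countP
lemma matchA_eq_countP (s : List Int) : ∀ (clause : List Int) (n : Nat),
    clause.foldl (fun m lit => if lit ∈ s then m + 1 else m) n
      = n + clause.countP (fun lit => decide (lit ∈ s)) := by
  intro clause
  induction clause with
  | nil => intro n; simp
  | cons a l ih =>
    intro n
    simp only [List.foldl_cons, List.countP_cons, ih]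
    by_cases h : a ∈ s
    · simp [h]; omega
    · simp [h]

-- A's flag loop, in closed form over countP
lemma loopA_eq (clause : List Int) : ∀ (KB : List (List Int)) (ins upd : Bool),
    KB.foldl (fun (st : Bool × Bool) sentence =>
      if sentence.length = 0 then st
      else
        let m := clause.foldl (fun m lit => if lit ∈ sentence then m + 1 else m) 0
        if m = sentence.length ∧ sentence.length ≤ clause.length then (false, st.2)
        else if m = clause.length ∧ sentence.length > clause.length then (st.1, true)
        else st) (ins, upd)
    = (ins && !(KB.any (fun s =>
          !s.isEmpty && (clause.countP (fun lit => decide (lit ∈ s)) == s.length)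
            && decide (s.length ≤ clause.length))),
       upd || KB.any (fun s =>
          !s.isEmpty && decide (clause.length < s.length)
            && (clause.countP (fun lit => decide (lit ∈ s)) == clause.length))) := by
  intro KB
  induction KB with
  | nil => intro ins upd; simp
  | cons s rest ih =>
    intro ins upd
    simp only [List.foldl_cons, List.any_cons]
    by_cases he : s.length = 0
    · have hse : s.isEmpty = true := by
        cases s with
        | nil => rfl
        | cons a t => simp at he
      rw [if_pos he, ih ins upd]
      simp [hse]
    · have hse : s.isEmpty = false := by
        cases s with
        | nil => simp at he
        | cons a t => rfl
      have hm := matchA_eq_countP s clause 0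
      set c := clause.countP (fun lit => decide (lit ∈ s)) with hc
      by_cases h1 : c = s.length ∧ s.length ≤ clause.length
      · have hlt : decide (clause.length < s.length) = false := by
          simp; omega
        have hcond : (clause.foldl (fun m lit => if lit ∈ s then m + 1 else m) 0 = s.length
            ∧ s.length ≤ clause.length) := ⟨by omega, h1.2⟩
        rw [if_neg he, if_pos hcond, ih false upd]
        simp [hse, hlt, h1.1, h1.2]
      · by_cases h2 : c = clause.length ∧ clause.length < s.length
        · have hle : decide (s.length ≤ clause.length) = false := by
            simp; omega
          have hncond1 : ¬ (clause.foldl (fun m lit => if lit ∈ s then m + 1 else m) 0 = s.length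
              ∧ s.length ≤ clause.length) := fun h => h1 ⟨by omega, h.2⟩
          have hcond2 : (clause.foldl (fun m lit => if lit ∈ s then m + 1 else m) 0 = clause.length
              ∧ s.length > clause.length) := ⟨by omega, h2.2⟩
          rw [if_neg he, if_neg hncond1, if_pos hcond2, ih ins true]
          simp [hse, hle, h2.1, h2.2]
        · have hf1 : (!s.isEmpty && (c == s.length) && decide (s.length ≤ clause.length)) = false := by
            rw [hse]
            by_cases hq : c = s.length
            · by_cases hr : s.length ≤ clause.length
              · exact absurd ⟨hq, hr⟩ h1
              · simp [hr]
            · simp [hq]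
          have hf2 : (!s.isEmpty && decide (clause.length < s.length) && (c == clause.length)) = false := by
            rw [hse]
            by_cases hq : clause.length < s.length
            · by_cases hr : c = clause.length
              · exact absurd ⟨hr, hq⟩ h2
              · simp [hr]
            · simp [hq]
          have hncond1 : ¬ (clause.foldl (fun m lit => if lit ∈ s then m + 1 else m) 0 = s.length
              ∧ s.length ≤ clause.length) := fun h => h1 ⟨by omega, h.2⟩
          have hncond2 : ¬ (clause.foldl (fun m lit => if lit ∈ s then m + 1 else m) 0 = clause.length
              ∧ s.length > clause.length) := fun h => h2 ⟨by omega, h.2⟩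
          rw [if_neg he, if_neg hncond1, if_neg hncond2, ih ins upd]
          rw [hf1, hf2]
          simp

-- membership in enumerate
lemma mem_enumerate_iff {α : Type} (xs : List α) (p : Int × α) : ∀ (s : Int),
    p ∈ PySem.List.enumerate xs s ↔ ∃ n : Nat, ∃ h : n < xs.length, p = (s + n, xs[n]) := by
  induction xs with
  | nil => intro s; simp [PySem.List.enumerate_nil]
  | cons x t ih =>
    intro s
    rw [PySem.List.enumerate_cons, List.mem_cons, ih (s + 1)]
    constructor
    · rintro (rfl | ⟨n, h, rfl⟩)
      · exact ⟨0, by simp, by simp⟩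
      · exact ⟨n + 1, by simpa using h, by simp; omega⟩
    · rintro ⟨n, h, rfl⟩
      cases n with
      | zero => left; simp
      | succ k =>
        right
        exact ⟨k, by simpa using h, by simp; omega⟩

-- inner occ loop over one sentence's literals: membership of the bucket
lemma mem_inner_occ (j : Int) (s : List Int) : ∀ (d : PySem.Dict Int (PySem.Set Int)) (k i : Int),
    i ∈ (s.foldl (fun d lit => d.modify lit [] (fun t => PySem.Set.add t j)) d).getD k []
      ↔ i ∈ d.getD k [] ∨ (k ∈ s ∧ i = j) := by
  induction s with
  | nil => intro d k i; simp
  | cons a t ih =>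
    intro d k i
    simp only [List.foldl_cons, ih, PySem.Dict.getD_modify, List.mem_cons]
    by_cases hk : k = a
    · subst hk
      rw [if_pos rfl, PySem.Set.mem_add]
      tauto
    · rw [if_neg hk]
      tauto

-- inner occ loop preserves Nodup of every bucket
lemma nodup_inner_occ (j : Int) (s : List Int) : ∀ (d : PySem.Dict Int (PySem.Set Int)),
    (∀ k, (d.getD k []).Nodup) → ∀ k,
    ((s.foldl (fun d lit => d.modify lit [] (fun t => PySem.Set.add t j)) d).getD k []).Nodup := by
  induction s with
  | nil => intro d hd k; simpa using hd k
  | cons a t ih =>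
    intro d hd k
    refine ih _ (fun k' => ?_) k
    rw [PySem.Dict.getD_modify]
    by_cases hk : k' = a
    · rw [if_pos hk]; exact PySem.Set.nodup_add _ _ (hd a)
    · rw [if_neg hk]; exact hd k'

-- outer occ loop over a list of (index, sentence) pairs
lemma mem_occ_fold (ps : List (Int × List Int)) : ∀ (d : PySem.Dict Int (PySem.Set Int)) (k i : Int),
    i ∈ (ps.foldl (fun d p =>
        p.2.foldl (fun d lit => d.modify lit [] (fun t => PySem.Set.add t p.1)) d) d).getD k []
      ↔ i ∈ d.getD k [] ∨ ∃ p ∈ ps, i = p.1 ∧ k ∈ p.2 := by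
  induction ps with
  | nil => intro d k i; simp
  | cons q qs ih =>
    intro d k i
    simp only [List.foldl_cons, ih, mem_inner_occ, List.mem_cons]
    constructor
    · rintro ((h | ⟨hk, rfl⟩) | ⟨p, hp, rfl, hkp⟩)
      · exact Or.inl h
      · exact Or.inr ⟨q, Or.inl rfl, rfl, hk⟩
      · exact Or.inr ⟨p, Or.inr hp, rfl, hkp⟩
    · rintro (h | ⟨p, (rfl | hp), rfl, hkp⟩)
      · exact Or.inl (Or.inl h)
      · exact Or.inl (Or.inr ⟨hkp, rfl⟩)
      · exact Or.inr ⟨p, hp, rfl, hkp⟩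

lemma nodup_occ_fold (ps : List (Int × List Int)) : ∀ (d : PySem.Dict Int (PySem.Set Int)),
    (∀ k, (d.getD k []).Nodup) → ∀ k,
    ((ps.foldl (fun d p =>
        p.2.foldl (fun d lit => d.modify lit [] (fun t => PySem.Set.add t p.1)) d) d).getD k []).Nodup := by
  induction ps with
  | nil => intro d hd k; exact hd k
  | cons q qs ih =>
    intro d hd k
    exact ih _ (fun k' => nodup_inner_occ q.1 q.2 d hd k') k

-- the occ built by B: bucket of k = exactly the indices of sentences containing k
lemma mem_occB (KB : List (List Int)) (k i : Int) :
    i ∈ (((PySem.List.enumerate KB).foldl (fun d p =>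
        p.2.foldl (fun d lit => d.modify lit [] (fun t => PySem.Set.add t p.1)) d)
        PySem.Dict.empty).getD k [])
      ↔ ∃ n : Nat, ∃ _ : n < KB.length, i = (n : Int) ∧ k ∈ KB[n] := by
  rw [mem_occ_fold]
  simp only [PySem.Dict.getD_empty, List.not_mem_nil, false_or]
  constructor
  · rintro ⟨p, hp, rfl, hkp⟩
    obtain ⟨n, h, rfl⟩ := (mem_enumerate_iff KB p 0).mp hp
    exact ⟨n, h, by simpa using hkp⟩
  · rintro ⟨n, h, rfl, hkn⟩
    exact ⟨((n : Int), KB[n]), (mem_enumerate_iff KB _ 0).mpr ⟨n, h, by simp⟩, rfl, hkn⟩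

lemma nodup_occB (KB : List (List Int)) (k : Int) :
    (((PySem.List.enumerate KB).foldl (fun d p =>
        p.2.foldl (fun d lit => d.modify lit [] (fun t => PySem.Set.add t p.1)) d)
        PySem.Dict.empty).getD k []).Nodup := by
  exact nodup_occ_fold _ _ (fun k' => by simp) k

-- scatter inner loop: length is preserved
lemma length_bump (L : List Int) : ∀ (m : List Nat),
    (L.foldl (fun m i => PySem.List.pySetD m i (PySem.List.pyGetD m i 0 + 1)) m).length
      = m.length := by
  induction L with
  | nil => intro m; rfl
  | cons x t ih =>
    intro m
    rw [List.foldl_cons, ih]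
    exact PySem.List.length_pySetD m x _

-- scatter inner loop: each in-bucket index gains exactly one (bucket Nodup, in range)
lemma getD_bump (L : List Int) : ∀ (m : List Nat) (j : Nat), L.Nodup →
    (∀ x ∈ L, 0 ≤ x ∧ x < (m.length : Int)) → j < m.length →
    PySem.List.pyGetD (L.foldl (fun m i => PySem.List.pySetD m i (PySem.List.pyGetD m i 0 + 1)) m) (j : Int) 0
      = PySem.List.pyGetD m (j : Int) 0 + (if (j : Int) ∈ L then 1 else 0) := by
  induction L with
  | nil => intro m j _ _ _; simp
  | cons x t ih =>
    intro m j hnd hrange hj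
    obtain ⟨hx0, hxlt⟩ := hrange x (List.mem_cons_self ..)
    have hxn : x = ((x.toNat : Nat) : Int) := by omega
    have hxl : x.toNat < m.length := by omega
    have hlen : (PySem.List.pySetD m x (PySem.List.pyGetD m x 0 + 1)).length = m.length :=
      PySem.List.length_pySetD m x _
    rw [List.foldl_cons,
      ih _ j (List.Nodup.of_cons hnd)
        (fun y hy => by rw [hlen]; exact hrange y (List.mem_cons_of_mem _ hy)) (by omega)]
    rw [hxn, PySem.List.pyGetD_pySetD_natCast m x.toNat j _ 0 hxl]
    by_cases hjx : (j : Int) = x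
    · have hjt : (j : Int) ∉ t := by
        rw [hjx]; exact (List.nodup_cons.mp hnd).1
      subst hjx
      simp [hjt]
    · have hne : j ≠ x.toNat := by omega
      rw [if_neg hne]
      have hcons : ((j : Int) ∈ ((x.toNat : Nat) : Int) :: t) ↔ ((j : Int) ∈ t) := by
        constructor
        · intro h
          rcases List.mem_cons.mp h with h | h
          · exact absurd (by omega : (j : Int) = x) hjx
          · exact h
        · exact List.mem_cons_of_mem _
      by_cases hjt : (j : Int) ∈ t
      · rw [if_pos hjt, if_pos (hcons.mpr hjt)]
      · rw [if_neg hjt, if_neg (fun h => hjt (hcons.mp h))]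

-- scatter over the clause: per-index value is a countP over the clause
lemma length_scatter (occ : PySem.Dict Int (PySem.Set Int)) (clause : List Int) :
    ∀ (m : List Nat),
    (clause.foldl (fun m lit =>
      (occ.getD lit []).foldl (fun m i =>
        PySem.List.pySetD m i (PySem.List.pyGetD m i 0 + 1)) m) m).length = m.length := by
  induction clause with
  | nil => intro m; rfl
  | cons a t ih =>
    intro m
    rw [List.foldl_cons, ih, length_bump]

lemma getD_scatter (occ : PySem.Dict Int (PySem.Set Int)) (clause : List Int)
    (hnd : ∀ k, (occ.getD k []).Nodup) :
    ∀ (m : List Nat) (j : Nat),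
    (∀ k, ∀ x ∈ occ.getD k [], 0 ≤ x ∧ x < (m.length : Int)) → j < m.length →
    PySem.List.pyGetD (clause.foldl (fun m lit =>
      (occ.getD lit []).foldl (fun m i =>
        PySem.List.pySetD m i (PySem.List.pyGetD m i 0 + 1)) m) m) (j : Int) 0
      = PySem.List.pyGetD m (j : Int) 0
        + clause.countP (fun lit => decide ((j : Int) ∈ occ.getD lit [])) := by
  induction clause with
  | nil => intro m j _ _; simp
  | cons a t ih =>
    intro m j hrange hj
    have hlen : (((occ.getD a []).foldl (fun m i =>
        PySem.List.pySetD m i (PySem.List.pyGetD m i 0 + 1)) m)).length = m.length :=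
      length_bump _ m
    rw [List.foldl_cons,
      ih _ j (fun k x hx => by rw [hlen]; exact hrange k x hx) (by omega),
      getD_bump _ m j (hnd a) (hrange a) hj, List.countP_cons]
    by_cases h : (j : Int) ∈ occ.getD a []
    · simp [h]; omega
    · simp [h]

-- B's match list is the pointwise countP over KB
lemma matchs_eq_map (KB : List (List Int)) (clause : List Int) :
    (clause.foldl (fun m lit =>
      ((((PySem.List.enumerate KB).foldl (fun d p =>
          p.2.foldl (fun d lit => d.modify lit [] (fun t => PySem.Set.add t p.1)) d)
          PySem.Dict.empty)).getD lit []).foldl (fun m i =>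
        PySem.List.pySetD m i (PySem.List.pyGetD m i 0 + 1)) m)
      (List.replicate KB.length 0))
    = KB.map (fun s => clause.countP (fun lit => decide (lit ∈ s))) := by
  set occ := ((PySem.List.enumerate KB).foldl (fun d p =>
      p.2.foldl (fun d lit => d.modify lit [] (fun t => PySem.Set.add t p.1)) d)
      PySem.Dict.empty) with hocc
  have hlenrep : (List.replicate KB.length (0 : Nat)).length = KB.length := by simp
  have hrange : ∀ k, ∀ x ∈ occ.getD k [], 0 ≤ x ∧ x < ((List.replicate KB.length (0:Nat)).length : Int) := by
    intro k x hx
    obtain ⟨n, h, rfl, _⟩ := (mem_occB KB k x).mp hx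
    rw [hlenrep]
    constructor <;> [positivity; exact_mod_cast h]
  apply List.ext_getElem
  · rw [length_scatter, hlenrep, List.length_map]
  · intro j h1 h2
    have hj : j < KB.length := by simpa using h2
    have hjl : j < (List.replicate KB.length (0:Nat)).length := by omega
    have := getD_scatter occ clause (fun k => hocc ▸ nodup_occB KB k)
      (List.replicate KB.length 0) j hrange hjl
    have hget : PySem.List.pyGetD (clause.foldl (fun m lit =>
        (occ.getD lit []).foldl (fun m i =>
          PySem.List.pySetD m i (PySem.List.pyGetD m i 0 + 1)) m)
        (List.replicate KB.length 0)) (j : Int) 0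
        = (clause.foldl (fun m lit =>
        (occ.getD lit []).foldl (fun m i =>
          PySem.List.pySetD m i (PySem.List.pyGetD m i 0 + 1)) m)
        (List.replicate KB.length 0))[j] := by
      rw [PySem.List.pyGetD_natCast, List.getD_eq_getElem]
    rw [← hget, this, PySem.List.pyGetD_natCast]
    have hrep : (List.replicate KB.length (0:Nat)).getD j 0 = 0 := by
      simp [List.getD_eq_getElem?_getD]
    rw [hrep, List.getElem_map]
    have hmem : ∀ lit, decide ((j : Int) ∈ occ.getD lit []) = decide (lit ∈ KB[j]) := by
      intro lit
      by_cases h : lit ∈ KB[j]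
      · simp only [h, decide_true, decide_eq_true_eq]
        exact (mem_occB KB lit (j : Int)).mpr ⟨j, hj, rfl, h⟩
      · simp only [h, decide_false, decide_eq_false_iff_not]
        intro hc
        obtain ⟨n, hn, hnj, hkn⟩ := (mem_occB KB lit (j : Int)).mp hc
        have : n = j := by omega
        exact h (this ▸ hkn)
    simp only [hmem]
    omega

-- any over a zip with a mapped copy
lemma zip_map_any {α : Type} (xs : List α) (f : α → Nat) (g : α × Nat → Bool) :
    (xs.zip (xs.map f)).any g = xs.any (fun x => g (x, f x)) := by
  induction xs with
  | nil => rfl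
  | cons x t ih => simp [ih]

-- flag-raising foldl is an any
lemma foldl_if_any {α : Type} (L : List α) (c : α → Bool) : ∀ (b : Bool),
    L.foldl (fun u p => if c p then true else u) b = (b || L.any c) := by
  induction L with
  | nil => intro b; simp
  | cons x t ih =>
    intro b
    rw [List.foldl_cons, List.any_cons, ih]
    cases h : c x
    · simp
    · simp

-- B's enumerate pass, with match values rewritten through the map, is an any over KB
lemma enum_any_eq (KB : List (List Int)) (f : List Int → Nat) (q : List Int → Nat → Bool) :
    (PySem.List.enumerate KB).any (fun p =>
      q p.2 (PySem.List.pyGetD (KB.map f) p.1 0))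
    = KB.any (fun s => q s (f s)) := by
  refine Bool.eq_iff_iff.mpr ?_
  rw [List.any_eq_true, List.any_eq_true]
  constructor
  · rintro ⟨p, hp, hq⟩
    obtain ⟨n, h, rfl⟩ := (mem_enumerate_iff KB p 0).mp hp
    refine ⟨KB[n], List.getElem_mem h, ?_⟩
    have : PySem.List.pyGetD (KB.map f) ((0 : Int) + (n : Nat)) 0 = f KB[n] := by
      rw [zero_add, PySem.List.pyGetD_natCast, List.getD_eq_getElem _ _ (by simpa using h),
        List.getElem_map]
    rwa [this] at hq
  · rintro ⟨s, hs, hq⟩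
    obtain ⟨n, h, rfl⟩ := List.mem_iff_getElem.mp hs
    refine ⟨((n : Int), KB[n]), (mem_enumerate_iff KB _ 0).mpr ⟨n, h, by simp⟩, ?_⟩
    have : PySem.List.pyGetD (KB.map f) ((n : Nat) : Int) 0 = f KB[n] := by
      rw [PySem.List.pyGetD_natCast, List.getD_eq_getElem _ _ (by simpa using h),
        List.getElem_map]
    rwa [this]

-- ===== VERDICT (by name: the statement is the Claim_ definition above) =====
theorem subsumption_spec : Claim_equal_subsumption := by
  intro KB clause _
  unfold Spec_subsumption subsumption subsumption_alt
  rw [loopA_eq clause KB true false]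
  simp only
  rw [matchs_eq_map KB clause]
  set f : List Int → Nat := fun s => clause.countP (fun lit => decide (lit ∈ s)) with hf
  rw [zip_map_any KB f, foldl_if_any,
    enum_any_eq KB f (fun s m => !s.isEmpty && decide (clause.length < s.length) && (m == clause.length))]
  simp only [hf]
  cases hA : KB.any (fun s =>
      !s.isEmpty && (clause.countP (fun lit => decide (lit ∈ s)) == s.length)
        && decide (s.length ≤ clause.length)) <;>
    cases hB : KB.any (fun s =>
      !s.isEmpty && decide (clause.length < s.length)
        && (clause.countP (fun lit => decide (lit ∈ s)) == clause.length)) <;> simp_all
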